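-- pv_equiv track=rewrite | github.com/blackshrub/FaithFlow_Enterprise-Grade-Church-Management-System | backend/services/redis/utils.py | sanitize_key_part
-- ===== SOURCE A (Python) =====
-- def sanitize_key_part(part: str) -> str:
--     """
--     Sanitize a string for use in Redis keys.
--
--     Removes or replaces characters that could cause issues in keys.
--
--     Args:
--         part: The string to sanitize
--
--     Returns:
--         str: Sanitized string safe for use in keys
--
--     Examples:
--         >>> sanitize_key_part("user@email.com")
--         'user_email.com'
--
--         >>> sanitize_key_part("hello world")
--         'hello_world'
--     """
--     # Replace problematic characters
--     replacements = {
--         "@": "_",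
--         " ": "_",
--         "\n": "",
--         "\r": "",
--         "\t": "_",
--     }
--
--     result = part
--     for old, new in replacements.items():
--         result = result.replace(old, new)
--
--     return result
-- ===== SOURCE B (Python) =====
-- def sanitize_key_part(part: str) -> str:
--     mapping = {"@": "_", " ": "_", "\t": "_", "\n": "", "\r": ""}
--     return "".join(mapping.get(c, c) for c in part)
-- ===== Notes on version B (the rewrite author's own statement) =====
-- stated objective: alternative
-- what changed: Replaces five sequential full-string str.replace passes with a single character-wise pass that joins a translation-dict lookup for each character.
import Mathlib
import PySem

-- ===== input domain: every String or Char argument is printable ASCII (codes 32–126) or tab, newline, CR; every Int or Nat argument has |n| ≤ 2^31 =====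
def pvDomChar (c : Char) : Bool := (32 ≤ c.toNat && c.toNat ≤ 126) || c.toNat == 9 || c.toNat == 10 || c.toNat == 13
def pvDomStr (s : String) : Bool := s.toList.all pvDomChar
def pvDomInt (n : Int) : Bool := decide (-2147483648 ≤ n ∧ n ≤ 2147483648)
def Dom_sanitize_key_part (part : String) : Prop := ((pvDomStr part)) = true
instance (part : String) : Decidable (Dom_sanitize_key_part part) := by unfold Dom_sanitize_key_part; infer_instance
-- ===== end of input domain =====

-- B replaces A's five sequential full-string replace passes with a single
-- character-wise pass joining translation-dict lookups (objective: alternative).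

-- ===== PORT A =====
def sanitize_key_part (part : String) : String :=
  let replacements : PySem.Dict String String :=
    PySem.Dict.mk [("@", "_"), (" ", "_"), ("\n", ""), ("\r", ""), ("\t", "_")]
  replacements.items.foldl (fun result p => PySem.Str.replace result p.1 p.2) part

-- ===== PORT B =====
def sanitize_key_part_alt (part : String) : String :=
  let mapping : PySem.Dict Char String :=
    PySem.Dict.mk [('@', "_"), (' ', "_"), ('\t', "_"), ('\n', ""), ('\r', "")]
  PySem.Str.join "" (part.toList.map (fun c => mapping.getD c (String.ofList [c])))

-- ===== PRECONDITION & SPEC =====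
def Spec_sanitize_key_part (part : String) (out : String) : Prop := out = sanitize_key_part_alt part
instance (part : String) (out : String) : Decidable (Spec_sanitize_key_part part out) := by unfold Spec_sanitize_key_part; infer_instance

-- ===== CLAIM (what is proved, stated in full; the proofs are below) =====
def Claim_equal_sanitize_key_part : Prop := ∀ (part : String), Dom_sanitize_key_part part → Spec_sanitize_key_part part (sanitize_key_part part)

-- ===== LEMMAS AND PROOFS =====

/-- Replacing a single-character pattern is a character-wise flatMap. -/
lemma replace_go_single (c : Char) (rep : List Char) :
    ∀ (l : List Char) (fuel : Nat) (acc : List Char), l.length ≤ fuel →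
    PySem.Chars.replace.go [c] rep fuel l acc
      = acc.reverse ++ l.flatMap (fun x => if x = c then rep else [x]) := by
  intro l
  induction l with
  | nil =>
      intro fuel acc _
      cases fuel <;> simp [PySem.Chars.replace.go]
  | cons h t ih =>
      intro fuel acc hf
      cases fuel with
      | zero => simp at hf
      | succ f =>
        by_cases hc : h = c
        · subst hc
          have : List.isPrefixOf [h] (h :: t) = true := by simp [List.isPrefixOf]
          simp only [PySem.Chars.replace.go, this, if_true]
          rw [show List.drop [h].length (h :: t) = t from rfl]
          rw [ih f (rep.reverse ++ acc) (by simpa using Nat.lt_succ_iff.mp (by simpa using hf))]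
          simp
        · have : List.isPrefixOf [c] (h :: t) = false := by
            simp [List.isPrefixOf]
            intro h'; exact absurd h'.symm hc
          simp only [PySem.Chars.replace.go, this]
          rw [ih f (h :: acc) (by simpa using Nat.lt_succ_iff.mp (by simpa using hf))]
          simp [hc]

lemma replace_single (l : List Char) (c : Char) (rep : List Char) :
    PySem.Chars.replace l [c] rep = l.flatMap (fun x => if x = c then rep else [x]) := by
  simpa [PySem.Chars.replace] using replace_go_single c rep l l.length [] le_rfl

lemma join_empty_sep (ps : List (List Char)) :
    PySem.Chars.join [] ps = ps.flatten := by
  induction ps with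
  | nil => simp [PySem.Chars.join, List.intercalate]
  | cons a rest ih =>
      cases rest with
      | nil => simp [PySem.Chars.join, List.intercalate]
      | cons b r =>
          simp only [PySem.Chars.join] at ih ⊢
          rw [show ([] : List Char).intercalate (a :: b :: r) = a ++ [].intercalate (b :: r) by
            simp [List.intercalate, List.intersperse]]
          simp [ih]

-- ===== VERDICT (by name: the statement is the Claim_ definition above) =====
theorem sanitize_key_part_spec : Claim_equal_sanitize_key_part := by
  intro part _
  unfold Spec_sanitize_key_part sanitize_key_part sanitize_key_part_alt
  simp only [List.foldl_cons, List.foldl_nil,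
    PySem.Str.replace, PySem.Str.join, String.toList_ofList]
  congr 1
  rw [show ("" : String).toList = [] from rfl, show ("@" : String).toList = ['@'] from rfl,
    show (" " : String).toList = [' '] from rfl, show ("\n" : String).toList = ['\n'] from rfl,
    show ("\r" : String).toList = ['\r'] from rfl, show ("\t" : String).toList = ['\t'] from rfl]
  rw [join_empty_sep]
  simp only [replace_single, List.flatMap_assoc, List.flatten_eq_flatMap,
    List.flatMap_map]
  congr 1
  funext x
  by_cases h1 : x = '@'
  · subst h1; decide
  by_cases h2 : x = ' '
  · subst h2; decide
  by_cases h3 : x = '\n'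
  · subst h3; decide
  by_cases h4 : x = '\r'
  · subst h4; decide
  by_cases h5 : x = '\t'
  · subst h5; decide
  have e1 : ('@' == x) = false := by simp [Ne.symm h1]
  have e2 : ((' ' : Char) == x) = false := by simp [Ne.symm h2]
  have e3 : (('\n' : Char) == x) = false := by simp [Ne.symm h3]
  have e4 : (('\r' : Char) == x) = false := by simp [Ne.symm h4]
  have e5 : (('\t' : Char) == x) = false := by simp [Ne.symm h5]
  simp [h1, h2, h3, h4, h5, PySem.Dict.getD, PySem.Dict.get?, List.find?, e1, e2, e3, e4, e5]
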